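-- pv_equiv track=rewrite | github.com/team-november/million-plant-map | python scrapers/FOGBIVolume1Scrape.py | get_first_two
-- ===== SOURCE A (Python) =====
-- def get_first_two(text):
--     result = ''
--     flag = 0
--     for c in text:
--         if c == ' ':
--             flag += 1
--             if flag == 2:
--                 return result
--             else:
--                 result += c
--         else:
--             result += c
--
--     return result
-- ===== SOURCE B (Python) =====
-- def get_first_two(text):
--     head, sep, tail = text.partition(' ')
--     second, _sep2, _rest = tail.partition(' ')
--     return head + sep + second
-- ===== Notes on version B (the rewrite author's own statement) =====
-- stated objective: idiomatic
-- what changed: Replaces the per-character loop with a space-counting flag by two str.partition calls on the space separator: take the text up to the first space, then the next word up to the second space, and concatenate; the C-implemented partition also makes B measurably faster.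
import Mathlib
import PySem

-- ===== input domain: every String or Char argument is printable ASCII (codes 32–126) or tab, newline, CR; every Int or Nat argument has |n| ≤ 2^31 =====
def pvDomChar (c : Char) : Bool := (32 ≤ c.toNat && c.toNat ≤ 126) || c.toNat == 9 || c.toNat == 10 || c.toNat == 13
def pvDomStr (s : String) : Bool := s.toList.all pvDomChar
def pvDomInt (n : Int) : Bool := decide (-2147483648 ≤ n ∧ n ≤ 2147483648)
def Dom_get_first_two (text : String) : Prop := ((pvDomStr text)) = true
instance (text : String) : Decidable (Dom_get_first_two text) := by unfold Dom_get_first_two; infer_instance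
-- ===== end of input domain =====

-- B replaces A's per-character loop (with a space-counting flag) by two partition-at-first-space
-- steps and a concatenation; same O(n) cost, more idiomatic.


-- ===== PORT A =====
-- A's loop: result accumulator and a flag counting spaces; on the second space, return result.
def getFirstTwoGo : List Char → List Char → Nat → List Char
  | [], res, _ => res
  | c :: cs, res, flag =>
    if c = ' ' then
      if flag + 1 = 2 then res
      else getFirstTwoGo cs (res ++ [c]) (flag + 1)
    else getFirstTwoGo cs (res ++ [c]) flag

def get_first_two (text : String) : String :=
  String.ofList (getFirstTwoGo text.toList [] 0)

-- ===== PORT B =====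
-- hand port of str.partition(' '): exact for the single-character separator ' '
def pyPartitionSpace (cs : List Char) : List Char × List Char × List Char :=
  let head := cs.takeWhile (fun c => c ≠ ' ')
  match cs.dropWhile (fun c => c ≠ ' ') with
  | [] => (head, [], [])
  | c :: rest => (head, [c], rest)

def get_first_two_alt (text : String) : String :=
  let (head, sep, tail) := pyPartitionSpace text.toList
  let (second, _sep2, _rest) := pyPartitionSpace tail
  String.ofList (head ++ sep ++ second)

-- ===== PRECONDITION & SPEC =====
def Spec_get_first_two (text : String) (out : String) : Prop := out = get_first_two_alt text
instance (text : String) (out : String) : Decidable (Spec_get_first_two text out) := by unfold Spec_get_first_two; infer_instance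

-- ===== CLAIM (what is proved, stated in full; the proofs are below) =====
def Claim_equal_get_first_two : Prop := ∀ (text : String), Dom_get_first_two text → Spec_get_first_two text (get_first_two text)

-- ===== LEMMAS AND PROOFS =====
theorem getFirstTwoGo_append (cs : List Char) : ∀ (res : List Char) (flag : Nat),
    getFirstTwoGo cs res flag = res ++ getFirstTwoGo cs [] flag := by
  induction cs with
  | nil => intro res flag; simp [getFirstTwoGo]
  | cons c cs ih =>
    intro res flag
    simp only [getFirstTwoGo]
    split_ifs with hc hf
    · simp
    · rw [ih (res ++ [c]), ih ([] ++ [c])]; simp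
    · rw [ih (res ++ [c]), ih ([] ++ [c])]; simp

theorem getFirstTwoGo_one (cs : List Char) :
    getFirstTwoGo cs [] 1 = cs.takeWhile (fun c => c ≠ ' ') := by
  induction cs with
  | nil => simp [getFirstTwoGo]
  | cons c cs ih =>
    simp only [getFirstTwoGo]
    split_ifs with hc
    · subst hc; simp
    · rw [getFirstTwoGo_append cs ([] ++ [c]) 1, ih]
      simp [hc]

theorem getFirstTwoGo_zero (cs : List Char) :
    getFirstTwoGo cs [] 0 =
      cs.takeWhile (fun c => c ≠ ' ') ++
        (match cs.dropWhile (fun c => c ≠ ' ') with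
          | [] => []
          | c :: rest => c :: rest.takeWhile (fun c => c ≠ ' ')) := by
  induction cs with
  | nil => simp [getFirstTwoGo]
  | cons c cs ih =>
    simp only [getFirstTwoGo]
    split_ifs with hc hf
    · omega
    · subst hc
      rw [getFirstTwoGo_append cs ([] ++ [' ']) (0 + 1), getFirstTwoGo_one]
      simp
    · rw [getFirstTwoGo_append cs ([] ++ [c]) 0, ih]
      simp [hc]

-- ===== VERDICT (by name: the statement is the Claim_ definition above) =====
theorem get_first_two_spec : Claim_equal_get_first_two := by
  intro text _
  unfold Spec_get_first_two get_first_two get_first_two_alt pyPartitionSpace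
  rw [getFirstTwoGo_zero]
  cases h : text.toList.dropWhile (fun c => c ≠ ' ') with
  | nil => simp
  | cons c rest =>
    simp only []
    cases h2 : rest.dropWhile (fun c => c ≠ ' ') <;> simp
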